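-- pv_equiv track=rewrite | github.com/seafire1991/allennlp_chinese | datasets/common/utils.py | segment_to_bmes
-- ===== SOURCE A (Python) =====
-- def segment_to_bmes(words):
--     new_words = []
--     new_tags = []
--     for word in words:
--         if len(word) == 1:
--             new_words.append(word)
--             new_tags.append("S")
--         elif len(word) > 1:
--             new_words.append(word[0])
--             new_tags.append("B")
--             for w in word[1:len(word) - 1]:
--                 new_words.append(w)
--                 new_tags.append("M")
--             new_words.append(word[len(word) - 1])
--             new_tags.append("E")
--         else:
--             continue
--     return new_words, new_tags
-- ===== SOURCE B (Python) =====
-- def segment_to_bmes(words):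
--     # Stage 1: flatten the characters and record word-boundary positions.
--     # Stage 2: tag each character position by boundary-set membership.
--     chars = []
--     starts = set()
--     ends = set()
--     pos = 0
--     for w in words:
--         if w:
--             starts.add(pos)
--             chars.extend(w)
--             pos += len(w)
--             ends.add(pos - 1)
--     tags = []
--     for i in range(len(chars)):
--         if i in starts and i in ends:
--             tags.append("S")
--         elif i in starts:
--             tags.append("B")
--         elif i in ends:
--             tags.append("E")
--         else:
--             tags.append("M")
--     return chars, tags
-- ===== Notes on version B (the rewrite author's own statement) =====
-- stated objective: alternative
-- what changed: Instead of emitting per-word tag blocks inside one loop, B first flattens the characters while recording word start/end offsets in two boundary sets, then tags every character position by membership in those sets (S if start and end, B if start, E if end, else M).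
import Mathlib
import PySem

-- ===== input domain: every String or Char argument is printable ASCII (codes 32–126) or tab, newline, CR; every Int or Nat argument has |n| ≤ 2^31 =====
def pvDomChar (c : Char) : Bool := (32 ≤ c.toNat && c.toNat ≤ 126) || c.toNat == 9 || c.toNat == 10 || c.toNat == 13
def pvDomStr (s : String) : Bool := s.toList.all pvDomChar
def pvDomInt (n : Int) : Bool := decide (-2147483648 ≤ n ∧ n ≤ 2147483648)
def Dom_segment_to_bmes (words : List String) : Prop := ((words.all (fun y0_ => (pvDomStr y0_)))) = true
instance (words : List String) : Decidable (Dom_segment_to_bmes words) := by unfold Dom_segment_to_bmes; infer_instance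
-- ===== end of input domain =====

-- B replaces A's single per-word tagging loop by two stages: flatten the characters while
-- recording word start/end offsets in two boundary sets, then tag every character position
-- by membership in those sets; objective: alternative (same cost, different algorithm).

-- ===== PORT A =====
-- one iteration of A's 'for word in words' loop on the (new_words, new_tags) accumulator;
-- the inner loop over word[1:len(word)-1] is a foldl over that slice
def segBmesStep (acc : List String × List String) (word : String) : List String × List String :=
  let cs := word.toList
  if cs.length = 1 then
    (acc.1 ++ [word], acc.2 ++ ["S"])
  else if cs.length > 1 then
    let acc1 := (acc.1 ++ [String.ofList (cs.take 1)], acc.2 ++ ["B"])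
    let acc2 := (PySem.List.slice cs (some 1) (some ((cs.length : Int) - 1))).foldl
      (fun a c => (a.1 ++ [String.ofList [c]], a.2 ++ ["M"])) acc1
    (acc2.1 ++ [String.ofList (cs.drop (cs.length - 1))], acc2.2 ++ ["E"])
  else acc

def segment_to_bmes (words : List String) : List String × List String :=
  words.foldl segBmesStep ([], [])

-- ===== PORT B =====
-- stage 1: one iteration of B's boundary-collecting loop on the state (chars, starts, ends, pos)
def segBoundsStep (st : List String × PySem.Set Int × PySem.Set Int × Int) (w : String) :
    List String × PySem.Set Int × PySem.Set Int × Int :=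
  let cs := w.toList
  if cs.length ≠ 0 then
    let starts := PySem.Set.add st.2.1 st.2.2.2
    let chars := st.1 ++ cs.map (fun c => String.ofList [c])
    let pos := st.2.2.2 + (cs.length : Int)
    let ends := PySem.Set.add st.2.2.1 (pos - 1)
    (chars, starts, ends, pos)
  else st

-- stage 2: the tag of one character position, by boundary-set membership
def segTag (starts ends : PySem.Set Int) (i : Int) : String :=
  if i ∈ starts ∧ i ∈ ends then "S"
  else if i ∈ starts then "B"
  else if i ∈ ends then "E"
  else "M"

def segment_to_bmes_alt (words : List String) : List String × List String :=
  let st := words.foldl segBoundsStep ([], [], [], 0)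
  (st.1, (PySem.List.pyRange 0 (st.1.length : Int) 1).map (segTag st.2.1 st.2.2.1))

-- ===== PRECONDITION & SPEC =====
def Spec_segment_to_bmes (words : List String) (out : List String × List String) : Prop := out = segment_to_bmes_alt words
instance (words : List String) (out : List String × List String) : Decidable (Spec_segment_to_bmes words out) := by unfold Spec_segment_to_bmes; infer_instance

-- ===== CLAIM (what is proved, stated in full; the proofs are below) =====
def Claim_equal_segment_to_bmes : Prop := ∀ (words : List String), Dom_segment_to_bmes words → Spec_segment_to_bmes words (segment_to_bmes words)

-- ===== LEMMAS AND PROOFS =====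

-- proof-side spec: the per-word tag block, the word-boundary offsets, the total length
def tagBlockStr (n : Nat) : List String :=
  if n = 1 then ["S"] else if n > 1 then "B" :: (List.replicate (n - 2) "M" ++ ["E"]) else []

def startOffs : List String → Int → List Int
  | [], _ => []
  | w :: ws, p =>
    if w.toList.length = 0 then startOffs ws p
    else p :: startOffs ws (p + (w.toList.length : Int))

def endOffs : List String → Int → List Int
  | [], _ => []
  | w :: ws, p =>
    if w.toList.length = 0 then endOffs ws p
    else (p + (w.toList.length : Int) - 1) :: endOffs ws (p + (w.toList.length : Int))

def totLen : List String → Int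
  | [] => 0
  | w :: ws => (w.toList.length : Int) + totLen ws

theorem totLen_nonneg (ws : List String) : 0 ≤ totLen ws := by
  induction ws with
  | nil => simp [totLen]
  | cons w ws ih => simp only [totLen]; positivity

theorem mem_startOffs_le (ws : List String) (p j : Int) (h : j ∈ startOffs ws p) : p ≤ j := by
  induction ws generalizing p with
  | nil => simp [startOffs] at h
  | cons w ws ih =>
    simp only [startOffs] at h
    split at h
    · exact ih p h
    · rcases List.mem_cons.mp h with h | h
      · omega
      · have := ih _ h; omega

theorem mem_endOffs_le (ws : List String) (p j : Int) (h : j ∈ endOffs ws p) : p ≤ j := by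
  induction ws generalizing p with
  | nil => simp [endOffs] at h
  | cons w ws ih =>
    simp only [endOffs] at h
    split at h
    · exact ih p h
    · rcases List.mem_cons.mp h with h | h
      · have : 0 < (w.toList.length : Int) := by omega
        omega
      · have := ih _ h; omega

-- stage-1 characterization: the fold flattens the characters, advances pos by the total
-- length, and the boundary sets collect exactly the start/end offsets
theorem segBounds_eq (ws : List String) (chars : List String) (S E : PySem.Set Int) (p : Int) :
    (ws.foldl segBoundsStep (chars, S, E, p)).1
        = chars ++ ws.flatMap (fun w => w.toList.map (fun c => String.ofList [c]))
    ∧ (ws.foldl segBoundsStep (chars, S, E, p)).2.2.2 = p + totLen ws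
    ∧ (∀ i, i ∈ (ws.foldl segBoundsStep (chars, S, E, p)).2.1 ↔ i ∈ S ∨ i ∈ startOffs ws p)
    ∧ (∀ i, i ∈ (ws.foldl segBoundsStep (chars, S, E, p)).2.2.1 ↔ i ∈ E ∨ i ∈ endOffs ws p) := by
  induction ws generalizing chars S E p with
  | nil => simp [totLen, startOffs, endOffs]
  | cons w ws ih =>
    by_cases h0 : w.toList.length = 0
    · have hstep : segBoundsStep (chars, S, E, p) w = (chars, S, E, p) := by
        simp [segBoundsStep, h0]
      have hw : w.toList.map (fun c => String.ofList [c]) = [] := by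
        simp [List.length_eq_zero_iff.mp h0]
      simp only [List.foldl_cons, hstep]
      obtain ⟨h1, h2, h3, h4⟩ := ih chars S E p
      refine ⟨by simp [h1, hw], by simp [h2, totLen, h0], ?_, ?_⟩
      · intro i; simp [h3 i, startOffs, h0]
      · intro i; simp [h4 i, endOffs, h0]
    · have hstep : segBoundsStep (chars, S, E, p) w
          = (chars ++ w.toList.map (fun c => String.ofList [c]),
             PySem.Set.add S p, PySem.Set.add E (p + (w.toList.length : Int) - 1),
             p + (w.toList.length : Int)) := by
        simp only [segBoundsStep, if_pos h0]
      simp only [List.foldl_cons, hstep]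
      obtain ⟨h1, h2, h3, h4⟩ :=
        ih (chars ++ w.toList.map (fun c => String.ofList [c]))
           (PySem.Set.add S p) (PySem.Set.add E (p + (w.toList.length : Int) - 1))
           (p + (w.toList.length : Int))
      refine ⟨?_, ?_, ?_, ?_⟩
      · rw [h1, List.flatMap_cons, List.append_assoc]
      · rw [h2]; simp only [totLen]; ring
      · intro i
        rw [h3 i, PySem.Set.mem_add]
        simp only [startOffs, if_neg h0, List.mem_cons]
        tauto
      · intro i
        rw [h4 i, PySem.Set.mem_add]
        simp only [endOffs, if_neg h0, List.mem_cons]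
        tauto

-- stage-2 characterization: tagging the positions p .. p+totLen-1 by membership in sets
-- that (from p on) agree with the start/end offsets yields the per-word tag blocks
theorem classify (ws : List String) (p : Int) (S E : PySem.Set Int)
    (hS : ∀ i, p ≤ i → (i ∈ S ↔ i ∈ startOffs ws p))
    (hE : ∀ i, p ≤ i → (i ∈ E ↔ i ∈ endOffs ws p)) :
    (PySem.List.pyRange p (p + totLen ws) 1).map (segTag S E)
      = ws.flatMap (fun w => tagBlockStr w.toList.length) := by
  induction ws generalizing p with
  | nil => simp [totLen, PySem.List.pyRange_one_eq_nil]
  | cons w ws ih =>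
    set n : Nat := w.toList.length with hn
    by_cases h0 : n = 0
    · have hs : startOffs (w :: ws) p = startOffs ws p := by simp [startOffs, ← hn, h0]
      have he : endOffs (w :: ws) p = endOffs ws p := by simp [endOffs, ← hn, h0]
      have ht : totLen (w :: ws) = totLen ws := by simp [totLen, ← hn, h0]
      rw [ht, ih p (fun i hi => hs ▸ hS i hi) (fun i hi => he ▸ hE i hi)]
      have hb : tagBlockStr w.toList.length = [] := by
        rw [← hn, h0]; rfl
      rw [List.flatMap_cons, hb, List.nil_append]
    · have hn1 : 1 ≤ (n : Int) := by omega
      have htnn := totLen_nonneg ws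
      have ht : totLen (w :: ws) = (n : Int) + totLen ws := by simp [totLen, ← hn]
      have hs : startOffs (w :: ws) p = p :: startOffs ws (p + n) := by
        simp [startOffs, ← hn, h0]
      have he : endOffs (w :: ws) p = (p + n - 1) :: endOffs ws (p + n) := by
        simp [endOffs, ← hn, h0]
      -- membership facts on the span p .. p+n-1
      have hSmem : ∀ i, p ≤ i → i < p + n → (i ∈ S ↔ i = p) := by
        intro i hip hin
        rw [hS i hip, hs]
        simp only [List.mem_cons]
        constructor
        · rintro (h | h)
          · exact h
          · have := mem_startOffs_le ws _ _ h; omega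
        · intro h; exact Or.inl h
      have hEmem : ∀ i, p ≤ i → i < p + n → (i ∈ E ↔ i = p + n - 1) := by
        intro i hip hin
        rw [hE i hip, he]
        simp only [List.mem_cons]
        constructor
        · rintro (h | h)
          · exact h
          · have := mem_endOffs_le ws _ _ h; omega
        · intro h; exact Or.inl h
      -- split the range at p+n
      rw [ht, show p + ((n : Int) + totLen ws) = (p + n) + totLen ws by ring] at *
      rw [PySem.List.pyRange_one_append p (p + n) ((p + n) + totLen ws) (by omega) (by omega),
          List.map_append]
      have hrest : (PySem.List.pyRange (p + n) (p + n + totLen ws) 1).map (segTag S E)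
          = ws.flatMap (fun w => tagBlockStr w.toList.length) := by
        apply ih
        · intro i hi
          rw [hS i (by omega), hs]
          simp only [List.mem_cons]
          constructor
          · rintro (h | h)
            · omega
            · exact h
          · intro h; exact Or.inr h
        · intro i hi
          rw [hE i (by omega), he]
          simp only [List.mem_cons]
          constructor
          · rintro (h | h)
            · omega
            · exact h
          · intro h; exact Or.inr h
      rw [hrest]
      have hfm : (w :: ws).flatMap (fun w => tagBlockStr w.toList.length)
          = tagBlockStr n ++ ws.flatMap (fun w => tagBlockStr w.toList.length) := by
        rw [List.flatMap_cons, ← hn]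
      rw [hfm]
      congr 1
      -- the head word's span
      by_cases h1 : n = 1
      · have : (n : Int) = 1 := by omega
        rw [this, PySem.List.pyRange_one_singleton]
        have hsS : segTag S E p = "S" := by
          have h1' : p ∈ S := (hSmem p le_rfl (by omega)).mpr rfl
          have h2' : p ∈ E := (hEmem p le_rfl (by omega)).mpr (by omega)
          simp [segTag, h1', h2']
        simp [hsS, tagBlockStr, h1]
      · have hn2 : 2 ≤ (n : Int) := by omega
        rw [PySem.List.pyRange_one_append p (p + 1) (p + n) (by omega) (by omega),
            PySem.List.pyRange_one_append (p + 1) (p + n - 1) (p + n) (by omega) (by omega)]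
        have hsingle : PySem.List.pyRange (p + n - 1) (p + n) 1 = [p + n - 1] := by
          have h := PySem.List.pyRange_one_singleton (p + (n : Int) - 1)
          rw [show p + (n : Int) - 1 + 1 = p + n by ring] at h
          exact h
        rw [PySem.List.pyRange_one_singleton, hsingle]
        simp only [List.map_append, List.map_cons, List.map_nil]
        have hB : segTag S E p = "B" := by
          have h1' : p ∈ S := (hSmem p le_rfl (by omega)).mpr rfl
          have h2' : p ∉ E := fun h => by have := (hEmem p le_rfl (by omega)).mp h; omega
          simp [segTag, h1', h2']
        have hEtag : segTag S E (p + n - 1) = "E" := by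
          have h1' : p + (n : Int) - 1 ∉ S := fun h => by
            have := (hSmem _ (by omega) (by omega)).mp h; omega
          have h2' : p + (n : Int) - 1 ∈ E := (hEmem _ (by omega) (by omega)).mpr rfl
          simp [segTag, h1', h2']
        have hM : (PySem.List.pyRange (p + 1) (p + n - 1) 1).map (segTag S E)
            = List.replicate (n - 2) "M" := by
          have hconst : ∀ i ∈ PySem.List.pyRange (p + 1) (p + (n : Int) - 1) 1,
              segTag S E i = "M" := by
            intro i hi
            rw [PySem.List.mem_pyRange_one] at hi
            have h1' : i ∉ S := fun h => by
              have := (hSmem i (by omega) (by omega)).mp h; omega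
            have h2' : i ∉ E := fun h => by
              have := (hEmem i (by omega) (by omega)).mp h; omega
            simp [segTag, h1', h2']
          rw [List.map_congr_left hconst, List.map_const',
              PySem.List.length_pyRange_one]
          congr 1
          omega
        rw [hB, hEtag, hM]
        have h2' : 1 < n := by omega
        simp [tagBlockStr, h1, h2']

-- A-side: the inner middle-character loop appends a map
theorem inner_foldl (xs : List Char) (ws ts : List String) :
    xs.foldl (fun (a : List String × List String) c => (a.1 ++ [String.ofList [c]], a.2 ++ ["M"]))
      (ws, ts)
    = (ws ++ xs.map (fun c => String.ofList [c]), ts ++ List.replicate xs.length "M") := by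
  induction xs generalizing ws ts with
  | nil => simp
  | cons c cs ih =>
    simp [List.foldl, ih, List.replicate_succ]

-- A-side: one step of A's loop appends the word's characters and its tag block
theorem step_eq (ws ts : List String) (word : String) :
    segBmesStep (ws, ts) word
    = (ws ++ word.toList.map (fun c => String.ofList [c]),
       ts ++ tagBlockStr word.toList.length) := by
  unfold segBmesStep
  set cs := word.toList with hcs
  by_cases h1 : cs.length = 1
  · obtain ⟨c, hc⟩ : ∃ c, cs = [c] := List.length_eq_one_iff.mp h1
    have hw : word = String.ofList [c] := by
      rw [← hc, hcs, String.ofList_toList]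
    simp [tagBlockStr, hc, hw]
  · by_cases h2 : cs.length > 1
    · have hslice : PySem.List.slice cs (some 1) (some ((cs.length : Int) - 1))
          = (cs.drop 1).take (cs.length - 2) := by
        have hb : ((cs.length : Int) - 1) = ((cs.length - 1 : Nat) : Int) := by omega
        rw [hb, show (1 : Int) = ((1 : Nat) : Int) from rfl, PySem.List.slice_natCast]
        congr 1
      simp only [if_neg h1, if_pos h2, hslice, inner_foldl]
      have hdecomp : cs.take 1 ++ ((cs.drop 1).take (cs.length - 2) ++ cs.drop (cs.length - 1)) = cs := by
        have hd : (cs.drop 1).drop (cs.length - 2) = cs.drop (cs.length - 1) := by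
          rw [List.drop_drop]; congr 1; omega
        conv_rhs => rw [← List.take_append_drop 1 cs]
        congr 1
        rw [← hd, List.take_append_drop]
      have hlen : ((cs.drop 1).take (cs.length - 2)).length = cs.length - 2 := by
        rw [List.length_take, List.length_drop]; omega
      obtain ⟨cl, hcl⟩ : ∃ c, cs.drop (cs.length - 1) = [c] :=
        List.length_eq_one_iff.mp (by rw [List.length_drop]; omega)
      obtain ⟨cf, hcf⟩ : ∃ c, cs.take 1 = [c] :=
        List.length_eq_one_iff.mp (by rw [List.length_take]; omega)
      have hblock : tagBlockStr cs.length = "B" :: (List.replicate (cs.length - 2) "M" ++ ["E"]) := by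
        simp [tagBlockStr, h1, h2]
      refine Prod.ext ?_ ?_
      · show ws ++ [String.ofList (cs.take 1)]
              ++ ((cs.drop 1).take (cs.length - 2)).map (fun c => String.ofList [c])
              ++ [String.ofList (cs.drop (cs.length - 1))]
            = ws ++ cs.map (fun c => String.ofList [c])
        rw [← congrArg (List.map (fun c => String.ofList [c])) hdecomp]
        simp [hcf, hcl]
      · show ts ++ ["B"] ++ List.replicate ((cs.drop 1).take (cs.length - 2)).length "M" ++ ["E"]
            = ts ++ tagBlockStr cs.length
        simp [hblock]
        omega
    · have h0 : cs = [] := List.length_eq_zero_iff.mp (by omega)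
      simp [h0, tagBlockStr]

-- A-side: A's foldl, from any accumulator, appends the two flattenings
theorem foldl_eq (words : List String) (ws ts : List String) :
    words.foldl segBmesStep (ws, ts)
    = (ws ++ words.flatMap (fun w => w.toList.map (fun c => String.ofList [c])),
       ts ++ words.flatMap (fun w => tagBlockStr w.toList.length)) := by
  induction words generalizing ws ts with
  | nil => simp
  | cons w rest ih =>
    rw [List.foldl_cons, step_eq, ih]
    simp

-- the flattened character list has length totLen
theorem flat_length (ws : List String) :
    ((ws.flatMap (fun w => w.toList.map (fun c => String.ofList [c]))).length : Int) = totLen ws := by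
  induction ws with
  | nil => simp [totLen]
  | cons w rest ih =>
    rw [List.flatMap_cons, List.length_append, List.length_map]
    push_cast
    rw [ih, totLen]

-- ===== VERDICT (by name: the statement is the Claim_ definition above) =====
theorem segment_to_bmes_spec : Claim_equal_segment_to_bmes := by
  intro words _
  unfold Spec_segment_to_bmes segment_to_bmes segment_to_bmes_alt
  obtain ⟨h1, h2, h3, h4⟩ := segBounds_eq words [] [] [] 0
  rw [foldl_eq]
  simp only [List.nil_append] at h1 ⊢
  rw [h1, flat_length]
  have hS : ∀ i, (0 : Int) ≤ i →
      (i ∈ (words.foldl segBoundsStep ([], [], [], 0)).2.1 ↔ i ∈ startOffs words 0) := by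
    intro i _; rw [h3 i]; simp
  have hE : ∀ i, (0 : Int) ≤ i →
      (i ∈ (words.foldl segBoundsStep ([], [], [], 0)).2.2.1 ↔ i ∈ endOffs words 0) := by
    intro i _; rw [h4 i]; simp
  rw [show totLen words = 0 + totLen words by ring, classify words 0 _ _ hS hE]
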